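-- pv_equiv track=rewrite | github.com/Sele3/Advent-of-Code-2023 | day13/solver.py | get_palindrome_index
-- ===== SOURCE A (Python) =====
-- from typing import List
--
-- def get_palindrome_index(nums: List[int], ignore_idx: int = -1) -> int:
--     """
--     Get the index of the reflection point that forms a palindrome
--     :param nums: The list of numbers
--     :param ignore_idx: Optional parameter which is only used for part 2 to ignore the original index
--     """
--     for i in range(1, len(nums)):
--         if nums[i] != nums[i - 1]:
--             continue
--
--         left, right = i - 2, i + 1
--         while left >= 0 and right < len(nums) and nums[left] == nums[right]:
--             left -= 1
--             right += 1
--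
--         if (left == -1 or right == len(nums)) and i != ignore_idx:
--             return i
--
--     return -1
-- ===== SOURCE B (Python) =====
-- from typing import List
--
-- def get_palindrome_index(nums: List[int], ignore_idx: int = -1) -> int:
--     """Return the first reflection index i (1..n-1) other than ignore_idx whose
--     mirror image reaches a boundary.  A candidate i (adjacent pair equal) is
--     verified by comparing reversed-prefix/suffix slices in chunks of doubling
--     size, so a failing candidate is rejected after O(matched length) work."""
--     n = len(nums)
--     for i in range(1, n):
--         if i != ignore_idx and nums[i] == nums[i - 1]:
--             m = min(i, n - i)
--             k, c = 1, 1
--             while k < m and nums[i - k - min(c, m - k):i - k][::-1] == nums[i + k:i + k + min(c, m - k)]: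
--                 k += min(c, m - k)
--                 c *= 2
--             if k == m:
--                 return i
--     return -1
-- ===== Notes on version B (the rewrite author's own statement) =====
-- stated objective: alternative
-- what changed: B replaces A's center-outward unit-step two-pointer expansion by bulk comparisons of reversed-prefix/suffix slice chunks of geometrically doubling size, keeping candidates' early rejection after O(matched length) work.
import Mathlib
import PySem

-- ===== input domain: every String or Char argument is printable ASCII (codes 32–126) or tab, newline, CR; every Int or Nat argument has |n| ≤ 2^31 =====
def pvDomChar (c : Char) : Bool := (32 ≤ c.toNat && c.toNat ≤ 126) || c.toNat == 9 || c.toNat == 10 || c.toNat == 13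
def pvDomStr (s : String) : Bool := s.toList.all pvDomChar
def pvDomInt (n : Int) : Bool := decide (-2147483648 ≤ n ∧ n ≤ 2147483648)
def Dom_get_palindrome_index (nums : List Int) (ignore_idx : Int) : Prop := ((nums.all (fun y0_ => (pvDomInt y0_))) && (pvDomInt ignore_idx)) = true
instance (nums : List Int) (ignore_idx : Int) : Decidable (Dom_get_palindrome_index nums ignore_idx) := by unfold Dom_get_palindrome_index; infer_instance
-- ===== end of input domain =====

-- B replaces A's center-outward unit-step two-pointer expansion by bulk slice comparisons
-- (reversed prefix chunk vs suffix chunk) of geometrically doubling size; objective: alternative.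

-- ===== PORT A =====
-- the inner 'while left >= 0 and right < len(nums) and nums[left] == nums[right]' loop
def pvExpand (nums : List Int) (left right : Int) : Int × Int :=
  if h : 0 ≤ left ∧ right < PySem.List.len nums ∧
      PySem.List.pyGetD nums left 0 = PySem.List.pyGetD nums right 0 then
    pvExpand nums (left - 1) (right + 1)
  else
    (left, right)
termination_by (left + 1).toNat
decreasing_by omega

-- the 'for i in range(1, len(nums))' loop with its early return
def pvAGo (nums : List Int) (ignore_idx : Int) : List Int → Int
  | [] => -1
  | i :: rest =>
    if PySem.List.pyGetD nums i 0 ≠ PySem.List.pyGetD nums (i - 1) 0 then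
      pvAGo nums ignore_idx rest
    else
      let p := pvExpand nums (i - 2) (i + 1)
      if (p.1 = -1 ∨ p.2 = PySem.List.len nums) ∧ i ≠ ignore_idx then i
      else pvAGo nums ignore_idx rest

def get_palindrome_index (nums : List Int) (ignore_idx : Int) : Int :=
  pvAGo nums ignore_idx (PySem.List.pyRange 1 (PySem.List.len nums) 1)

-- ===== PORT B =====
-- the doubling-chunk verification loop: c = 2^t is Python's doubling counter 'c';
-- nums[i-k-c':i-k][::-1] == nums[i+k:i+k+c']  ([::-1] is .reverse: PySem.List.slice?_none_none_neg_one)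
def pvChunk (nums : List Int) (i m k : Int) (t : Nat) : Int :=
  if h : k < m ∧
      (PySem.List.slice nums (some (i - k - min ((2 : Int) ^ t) (m - k))) (some (i - k))).reverse =
        PySem.List.slice nums (some (i + k)) (some (i + k + min ((2 : Int) ^ t) (m - k))) then
    pvChunk nums i m (k + min ((2 : Int) ^ t) (m - k)) (t + 1)
  else k
termination_by (m - k).toNat
decreasing_by
  have h1 : (1 : Int) ≤ 2 ^ t := one_le_pow₀ (by norm_num)
  have h2 : (1 : Int) ≤ min ((2 : Int) ^ t) (m - k) := le_min h1 (by omega)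
  have h3 : min ((2 : Int) ^ t) (m - k) ≤ m - k := min_le_right _ _
  omega

def pvBGo (nums : List Int) (ignore_idx : Int) : List Int → Int
  | [] => -1
  | i :: rest =>
    if i ≠ ignore_idx ∧ PySem.List.pyGetD nums i 0 = PySem.List.pyGetD nums (i - 1) 0 then
      let m := min i (PySem.List.len nums - i)
      if pvChunk nums i m 1 0 = m then i
      else pvBGo nums ignore_idx rest
    else pvBGo nums ignore_idx rest

def get_palindrome_index_alt (nums : List Int) (ignore_idx : Int) : Int :=
  pvBGo nums ignore_idx (PySem.List.pyRange 1 (PySem.List.len nums) 1)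

-- ===== PRECONDITION & SPEC =====
def Spec_get_palindrome_index (nums : List Int) (ignore_idx : Int) (out : Int) : Prop := out = get_palindrome_index_alt nums ignore_idx
instance (nums : List Int) (ignore_idx : Int) (out : Int) : Decidable (Spec_get_palindrome_index nums ignore_idx out) := by unfold Spec_get_palindrome_index; infer_instance

-- ===== CLAIM (what is proved, stated in full; the proofs are below) =====
def Claim_equal_get_palindrome_index : Prop := ∀ (nums : List Int) (ignore_idx : Int), Dom_get_palindrome_index nums ignore_idx → Spec_get_palindrome_index nums ignore_idx (get_palindrome_index nums ignore_idx)

-- ===== LEMMAS AND PROOFS =====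

-- the expansion loop reaches a boundary iff every remaining mirrored pair matches
theorem pvExpand_boundary_iff (nums : List Int) (l r : Int)
    (hl : -1 ≤ l) (hr : r ≤ (nums.length : Int)) :
    ((pvExpand nums l r).1 = -1 ∨ (pvExpand nums l r).2 = PySem.List.len nums) ↔
      (∀ d : Nat, (d : Int) ≤ l → (d : Int) < (nums.length : Int) - r →
        PySem.List.pyGetD nums (l - d) 0 = PySem.List.pyGetD nums (r + d) 0) := by
  have main : ∀ fuel : Nat, ∀ l r : Int, (l + 1).toNat ≤ fuel → -1 ≤ l → r ≤ (nums.length : Int) →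
      (((pvExpand nums l r).1 = -1 ∨ (pvExpand nums l r).2 = PySem.List.len nums) ↔
        (∀ d : Nat, (d : Int) ≤ l → (d : Int) < (nums.length : Int) - r →
          PySem.List.pyGetD nums (l - d) 0 = PySem.List.pyGetD nums (r + d) 0)) := by
    intro fuel
    induction fuel with
    | zero =>
      intro l r hf hl hr
      have hl' : l = -1 := by omega
      subst hl'
      rw [pvExpand, dif_neg (by omega)]
      simp only [PySem.List.len_eq]
      constructor
      · intro _ d hd _; exfalso; omega
      · intro _; exact Or.inl trivial
    | succ fuel ih =>
      intro l r hf hl hr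
      rw [pvExpand]
      by_cases hg : 0 ≤ l ∧ r < PySem.List.len nums ∧
          PySem.List.pyGetD nums l 0 = PySem.List.pyGetD nums r 0
      · rw [dif_pos hg]
        obtain ⟨hg1, hg2, hg3⟩ := hg
        rw [PySem.List.len_eq] at hg2
        rw [ih (l - 1) (r + 1) (by omega) (by omega) (by omega)]
        constructor
        · intro h d hd1 hd2
          match d with
          | 0 => simpa using hg3
          | (d' + 1) =>
            have := h d' (by push_cast at hd1 ⊢; omega) (by push_cast at hd2 ⊢; omega)
            have e1 : l - 1 - (d' : Int) = l - ((d' : Nat) + 1 : Nat) := by push_cast; ring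
            have e2 : r + 1 + (d' : Int) = r + ((d' : Nat) + 1 : Nat) := by push_cast; ring
            rw [e1, e2] at this
            exact this
        · intro h d hd1 hd2
          have := h (d + 1) (by push_cast; omega) (by push_cast; omega)
          have e1 : l - ((d : Nat) + 1 : Nat) = l - 1 - (d : Int) := by push_cast; ring
          have e2 : r + ((d : Nat) + 1 : Nat) = r + 1 + (d : Int) := by push_cast; ring
          rw [e1, e2] at this
          exact this
      · rw [dif_neg hg]
        simp only [PySem.List.len_eq] at hg ⊢
        push Not at hg
        by_cases hl0 : 0 ≤ l
        · by_cases hrn : r < (nums.length : Int)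
          · have hne := hg hl0 hrn
            constructor
            · intro hb; exfalso; omega
            · intro h
              exfalso
              exact hne (by simpa using h 0 (by omega) (by omega))
          · have hr' : r = (nums.length : Int) := by omega
            constructor
            · intro _ d hd1 hd2; exfalso; omega
            · intro _; right; exact hr'
        · have hl' : l = -1 := by omega
          constructor
          · intro _ d hd1 hd2; exfalso; omega
          · intro _; left; exact hl'
  exact main (l + 1).toNat l r le_rfl hl hr

-- one window of mirrored pairs matches iff the reversed left chunk equals the right chunk
theorem win_iff (nums : List Int) (j k c : Nat) (hjk : k + c ≤ j) (hn : j + k + c ≤ nums.length) :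
    (((nums.drop (j - k - c)).take c).reverse = (nums.drop (j + k)).take c) ↔
      (∀ d : Nat, k ≤ d → d < k + c → nums.getD (j - 1 - d) 0 = nums.getD (j + d) 0) := by
  have hlenL : ((nums.drop (j - k - c)).take c).length = c := by simp; omega
  have hlenR : ((nums.drop (j + k)).take c).length = c := by simp; omega
  have hgetL : ∀ e : Nat, e < c →
      ((nums.drop (j - k - c)).take c).reverse[e]? = nums[j - 1 - (k + e)]? := by
    intro e he
    rw [List.getElem?_reverse (by simp; omega)]
    rw [hlenL, List.getElem?_take_of_lt (by omega), List.getElem?_drop]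
    congr 1
    omega
  have hgetR : ∀ e : Nat, e < c → ((nums.drop (j + k)).take c)[e]? = nums[j + (k + e)]? := by
    intro e he
    rw [List.getElem?_take_of_lt (by omega), List.getElem?_drop, Nat.add_assoc]
  constructor
  · intro h d hd1 hd2
    have := congrArg (fun l : List Int => l[d - k]?) h
    simp only [hgetL (d - k) (by omega), hgetR (d - k) (by omega)] at this
    rw [show k + (d - k) = d by omega] at this
    rw [List.getD_eq_getElem nums 0 (by omega), List.getD_eq_getElem nums 0 (by omega)]
    rw [List.getElem?_eq_getElem (by omega : j - 1 - d < nums.length),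
      List.getElem?_eq_getElem (by omega : j + d < nums.length)] at this
    exact Option.some.inj this
  · intro hP
    apply List.ext_getElem?
    intro e
    by_cases he : e < c
    · rw [hgetL e he, hgetR e he]
      rw [List.getElem?_eq_getElem (by omega : j - 1 - (k + e) < nums.length),
        List.getElem?_eq_getElem (by omega : j + (k + e) < nums.length)]
      have := hP (k + e) (by omega) (by omega)
      rw [List.getD_eq_getElem nums 0 (by omega), List.getD_eq_getElem nums 0 (by omega)] at this
      exact congrArg some this
    · rw [List.getElem?_eq_none (by rw [List.length_reverse, hlenL]; omega),
        List.getElem?_eq_none (by rw [hlenR]; omega)]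

-- the doubling-chunk loop reaches m iff every remaining mirrored pair matches
theorem pvChunk_iff (nums : List Int) (j m : Nat) (hmj : m ≤ j) (hmn : j + m ≤ nums.length) :
    ∀ (fuel k t : Nat), 1 ≤ k → k ≤ m → m - k ≤ fuel →
      (pvChunk nums (j : Int) (m : Int) (k : Int) t = (m : Int) ↔
        ∀ d : Nat, k ≤ d → d < m → nums.getD (j - 1 - d) 0 = nums.getD (j + d) 0) := by
  intro fuel
  induction fuel with
  | zero =>
    intro k t h1 h2 h3
    have hk : k = m := by omega
    subst hk
    rw [pvChunk, dif_neg (by rintro ⟨h, -⟩; exact lt_irrefl _ h)]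
    constructor
    · intro _ d hd1 hd2; exact absurd hd2 (by omega)
    · intro _; rfl
  | succ fuel ih =>
    intro k t h1 h2 h3
    by_cases hkm : k < m
    · have hc1 : 1 ≤ min (2 ^ t) (m - k) := le_min Nat.one_le_two_pow (by omega)
      have hc2 : min (2 ^ t) (m - k) ≤ m - k := min_le_right _ _
      have hmin : min ((2 : Int) ^ t) ((m : Int) - (k : Int)) = ((min (2 ^ t) (m - k) : Nat) : Int) := by
        push_cast [Nat.cast_min]
        omega
      have hLs : PySem.List.slice nums
          (some ((j : Int) - (k : Int) - min ((2 : Int) ^ t) ((m : Int) - (k : Int))))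
          (some ((j : Int) - (k : Int))) =
          (nums.drop (j - k - min (2 ^ t) (m - k))).take (min (2 ^ t) (m - k)) := by
        rw [hmin, show (j : Int) - (k : Int) - ((min (2 ^ t) (m - k) : Nat) : Int) =
            ((j - k - min (2 ^ t) (m - k) : Nat) : Int) by omega,
          show (j : Int) - (k : Int) = ((j - k : Nat) : Int) by omega, PySem.List.slice_natCast]
        congr 1
        omega
      have hRs : PySem.List.slice nums (some ((j : Int) + (k : Int)))
          (some ((j : Int) + (k : Int) + min ((2 : Int) ^ t) ((m : Int) - (k : Int)))) =
          (nums.drop (j + k)).take (min (2 ^ t) (m - k)) := by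
        rw [hmin, show (j : Int) + (k : Int) + ((min (2 ^ t) (m - k) : Nat) : Int) =
            ((j + k + min (2 ^ t) (m - k) : Nat) : Int) by push_cast; ring,
          show (j : Int) + (k : Int) = ((j + k : Nat) : Int) by push_cast; ring,
          PySem.List.slice_natCast]
        congr 1
        omega
      have hEqiff : ((PySem.List.slice nums
            (some ((j : Int) - (k : Int) - min ((2 : Int) ^ t) ((m : Int) - (k : Int))))
            (some ((j : Int) - (k : Int)))).reverse =
          PySem.List.slice nums (some ((j : Int) + (k : Int)))
            (some ((j : Int) + (k : Int) + min ((2 : Int) ^ t) ((m : Int) - (k : Int))))) ↔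
          (∀ d : Nat, k ≤ d → d < k + min (2 ^ t) (m - k) →
            nums.getD (j - 1 - d) 0 = nums.getD (j + d) 0) := by
        rw [hLs, hRs]
        exact win_iff nums j k (min (2 ^ t) (m - k)) (by omega) (by omega)
      by_cases hEq : (PySem.List.slice nums
            (some ((j : Int) - (k : Int) - min ((2 : Int) ^ t) ((m : Int) - (k : Int))))
            (some ((j : Int) - (k : Int)))).reverse =
          PySem.List.slice nums (some ((j : Int) + (k : Int)))
            (some ((j : Int) + (k : Int) + min ((2 : Int) ^ t) ((m : Int) - (k : Int))))
      · rw [pvChunk, dif_pos ⟨by exact_mod_cast hkm, hEq⟩]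
        rw [show (k : Int) + min ((2 : Int) ^ t) ((m : Int) - (k : Int)) =
            ((k + min (2 ^ t) (m - k) : Nat) : Int) by rw [hmin]; push_cast; ring]
        rw [ih (k + min (2 ^ t) (m - k)) (t + 1) (by omega) (by omega) (by omega)]
        have hwin := hEqiff.mp hEq
        constructor
        · intro h d hd1 hd2
          by_cases hdc : d < k + min (2 ^ t) (m - k)
          · exact hwin d hd1 hdc
          · exact h d (by omega) hd2
        · intro h d hd1 hd2
          exact h d (by omega) hd2
      · rw [pvChunk, dif_neg (by rintro ⟨-, h2⟩; exact hEq h2)]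
        constructor
        · intro h
          exfalso
          have : k = m := by exact_mod_cast h
          omega
        · intro h
          exfalso
          exact hEq (hEqiff.mpr (fun d hd1 hd2 => h d hd1 (by omega)))
    · have hk : k = m := by omega
      subst hk
      rw [pvChunk, dif_neg (by rintro ⟨h, -⟩; exact lt_irrefl _ h)]
      constructor
      · intro _ d hd1 hd2; exact absurd hd2 (by omega)
      · intro _; rfl

-- A's per-index test (adjacent equality + boundary expansion) coincides with B's chunk test
theorem cond_iff (nums : List Int) (j : Nat) (hj1 : 1 ≤ j) (hj2 : j < nums.length) :
    (PySem.List.pyGetD nums (j : Int) 0 = PySem.List.pyGetD nums ((j : Int) - 1) 0 ∧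
      ((pvExpand nums ((j : Int) - 2) ((j : Int) + 1)).1 = -1 ∨
        (pvExpand nums ((j : Int) - 2) ((j : Int) + 1)).2 = PySem.List.len nums)) ↔
      (PySem.List.pyGetD nums (j : Int) 0 = PySem.List.pyGetD nums ((j : Int) - 1) 0 ∧
        pvChunk nums (j : Int) (min (j : Int) (PySem.List.len nums - (j : Int))) 1 0 =
          min (j : Int) (PySem.List.len nums - (j : Int))) := by
  set n := nums.length with hn
  set m := min j (n - j) with hm
  have hmj : m ≤ j := min_le_left _ _
  have hmn : m ≤ n - j := min_le_right _ _
  have hm1 : 1 ≤ m := by omega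
  have hmin : min (j : Int) (PySem.List.len nums - (j : Int)) = (m : Int) := by
    simp only [PySem.List.len_eq, ← hn]
    rw [hm]
    push_cast [Nat.cast_min, Nat.cast_sub (le_of_lt hj2)]
    omega
  rw [hmin]
  -- A-side: its test holds iff every mirrored pair below m matches
  have hA : (PySem.List.pyGetD nums (j : Int) 0 = PySem.List.pyGetD nums ((j : Int) - 1) 0 ∧
      ((pvExpand nums ((j : Int) - 2) ((j : Int) + 1)).1 = -1 ∨
        (pvExpand nums ((j : Int) - 2) ((j : Int) + 1)).2 = PySem.List.len nums)) ↔
      (∀ k : Nat, k < m → nums.getD (j - 1 - k) 0 = nums.getD (j + k) 0) := by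
    rw [pvExpand_boundary_iff nums ((j : Int) - 2) ((j : Int) + 1) (by omega) (by omega)]
    rw [show (j : Int) - 1 = ((j - 1 : Nat) : Int) by omega]
    simp only [PySem.List.pyGetD_natCast, ← hn]
    constructor
    · rintro ⟨h0, h⟩ k hk
      match k with
      | 0 => simpa using h0.symm
      | (k' + 1) =>
        have := h k' (by omega) (by omega)
        rw [show (j : Int) - 2 - (k' : Int) = ((j - 1 - (k' + 1) : Nat) : Int) by omega,
          show (j : Int) + 1 + (k' : Int) = ((j + (k' + 1) : Nat) : Int) by push_cast; omega,
          PySem.List.pyGetD_natCast, PySem.List.pyGetD_natCast] at this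
        exact this
    · intro hP
      refine ⟨by simpa using (hP 0 hm1).symm, ?_⟩
      intro d hd1 hd2
      have := hP (d + 1) (by omega)
      rw [show (j : Int) - 2 - (d : Int) = ((j - 1 - (d + 1) : Nat) : Int) by omega,
        show (j : Int) + 1 + (d : Int) = ((j + (d + 1) : Nat) : Int) by push_cast; omega,
        PySem.List.pyGetD_natCast, PySem.List.pyGetD_natCast]
      exact this
  -- adjacent-pair filter is exactly the k = 0 pair
  have h0iff : (PySem.List.pyGetD nums (j : Int) 0 = PySem.List.pyGetD nums ((j : Int) - 1) 0) ↔
      (nums.getD (j - 1) 0 = nums.getD j 0) := by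
    rw [show (j : Int) - 1 = ((j - 1 : Nat) : Int) by omega]
    simp only [PySem.List.pyGetD_natCast]
    exact eq_comm
  -- B-side: the chunk loop from k = 1 covers exactly the pairs 1 ≤ d < m
  have hChunk : (pvChunk nums (j : Int) (m : Int) 1 0 = (m : Int)) ↔
      (∀ d : Nat, 1 ≤ d → d < m → nums.getD (j - 1 - d) 0 = nums.getD (j + d) 0) := by
    have := pvChunk_iff nums j m hmj (by omega) m 1 0 le_rfl hm1 (by omega)
    simpa using this
  constructor
  · rintro ⟨h0, hb⟩
    have hp := hA.mp ⟨h0, hb⟩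
    exact ⟨h0, hChunk.mpr (fun d _ hd2 => hp d hd2)⟩
  · rintro ⟨h0, hc⟩
    refine ⟨h0, (hA.mpr ?_).2⟩
    intro d hd
    match d with
    | 0 => simpa using h0iff.mp h0
    | (d' + 1) => exact hChunk.mp hc (d' + 1) (by omega) hd

-- the two loops agree index by index
theorem go_eq (nums : List Int) (ig : Int) (L : List Int)
    (hL : ∀ i ∈ L, ∃ jn : Nat, i = (jn : Int) ∧ 1 ≤ jn ∧ jn < nums.length) :
    pvAGo nums ig L = pvBGo nums ig L := by
  induction L with
  | nil => rfl
  | cons i rest ih =>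
    obtain ⟨jn, rfl, hj1, hj2⟩ := hL i (List.mem_cons_self)
    have hrest : ∀ x ∈ rest, ∃ jn : Nat, x = (jn : Int) ∧ 1 ≤ jn ∧ jn < nums.length :=
      fun x hx => hL x (List.mem_cons_of_mem _ hx)
    have hiff := cond_iff nums jn hj1 hj2
    simp only [pvAGo, pvBGo]
    split_ifs <;> first | rfl | exact ih hrest | tauto

-- ===== VERDICT (by name: the statement is the Claim_ definition above) =====
theorem get_palindrome_index_spec : Claim_equal_get_palindrome_index := by
  intro nums ig _
  unfold Spec_get_palindrome_index get_palindrome_index get_palindrome_index_alt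
  apply go_eq
  intro i hi
  rw [PySem.List.len_eq] at hi
  rw [PySem.List.mem_pyRange_one] at hi
  exact ⟨i.toNat, by omega, by omega, by omega⟩
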